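-- pv_equiv track=rewrite | github.com/PythonHugs/AdventOfCode2023 | puzzle_3/puzzle_3.py | get_part_number_indices
-- ===== SOURCE A (Python) =====
-- def get_part_number_indices(puzzle_input):
--     part_number_indices = {}
--     for line_index, line in enumerate(puzzle_input):
--         part_number_indices[line_index] = []
--         int_stack = []
--         for i, char in enumerate(line):
--             try:
--                 int(char)
--                 int_stack.append(i)
--                 if i == len(line) - 1:
--                     part_number_indices[line_index].append(int_stack)
--                     int_stack = []
--             except ValueError:
--                 if len(int_stack) > 0:
--                     part_number_indices[line_index].append(int_stack)
--                     int_stack = []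
--     return part_number_indices
-- ===== SOURCE B (Python) =====
-- def _digit_runs(line):
--     digits = "0123456789"
--     runs = []
--     i, n = 0, len(line)
--     while i < n:
--         if line[i] in digits:
--             j = i
--             while j < n and line[j] in digits:
--                 j += 1
--             runs.append(list(range(i, j)))
--             i = j
--         else:
--             i += 1
--     return runs
--
--
-- def get_part_number_indices(puzzle_input):
--     return {k: _digit_runs(line) for k, line in enumerate(puzzle_input)}
-- ===== Notes on version B (the rewrite author's own statement) =====
-- stated objective: faster
-- what changed: Replaces A's char-by-char fold with an int_stack, try/except digit probe and end-of-line flush by a two-pointer run scanner per line (find a digit, advance a second index past the run, emit range(i, j)) wrapped in a dict comprehension.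
import Mathlib
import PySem

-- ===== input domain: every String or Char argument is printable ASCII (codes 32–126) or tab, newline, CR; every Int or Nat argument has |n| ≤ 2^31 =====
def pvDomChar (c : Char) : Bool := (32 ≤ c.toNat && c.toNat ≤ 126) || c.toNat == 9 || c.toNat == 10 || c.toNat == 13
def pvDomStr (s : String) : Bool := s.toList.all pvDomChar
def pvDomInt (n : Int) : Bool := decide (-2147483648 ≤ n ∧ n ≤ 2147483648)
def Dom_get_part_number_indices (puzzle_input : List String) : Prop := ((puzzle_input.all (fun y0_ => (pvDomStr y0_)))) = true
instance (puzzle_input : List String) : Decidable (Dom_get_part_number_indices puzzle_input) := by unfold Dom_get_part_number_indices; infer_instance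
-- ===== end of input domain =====

-- B replaces A's stack-and-flush character fold by a per-line two-pointer digit-run scanner; same output, measurably faster by a constant factor (no try/except probe per char).

-- ===== PORT A =====
-- A's inner loop threads the dict and the int_stack; `int(char)` succeeding is (PySem.Int.ofChars? [char]).isSome.
def get_part_number_indices (puzzle_input : List String) : List (Int × List (List Int)) :=
  ((PySem.List.enumerate puzzle_input 0).foldl
    (fun (d : PySem.Dict Int (List (List Int))) p =>
      let line := p.2.toList
      let d := d.insert p.1 ([] : List (List Int))
      let st := (PySem.List.enumerate line 0).foldl
        (fun (acc : PySem.Dict Int (List (List Int)) × List Int) q =>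
          if (PySem.Int.ofChars? [q.2]).isSome then
            let stack := acc.2 ++ [q.1]
            if q.1 == (line.length : Int) - 1 then
              (acc.1.modify p.1 [] (fun l => l ++ [stack]), [])
            else (acc.1, stack)
          else
            if acc.2.length > 0 then (acc.1.modify p.1 [] (fun l => l ++ [acc.2]), [])
            else acc) (d, [])
      st.1) PySem.Dict.empty).items

-- ===== PORT B =====
-- `c in "0123456789"` of Source B
def pvDigit (c : Char) : Bool := ['0','1','2','3','4','5','6','7','8','9'].contains c

-- inner `while j < n and line[j] in digits: j += 1` of Source B
def pvScan (line : List Char) (j : Nat) : Nat :=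
  if h : j < line.length then
    if pvDigit (getElem line j h) then pvScan line (j + 1) else j
  else j
termination_by line.length - j

theorem pvScan_ge (line : List Char) (j : Nat) : j ≤ pvScan line j := by
  unfold pvScan
  split_ifs with h hd
  · exact le_trans (Nat.le_succ j) (pvScan_ge line (j + 1))
  · exact le_refl j
  · exact le_refl j
termination_by line.length - j

-- outer `while i < n` loop of Source B: at each run start emit list(range(i, j))
def pvRuns (line : List Char) (i : Nat) : List (List Int) :=
  if h : i < line.length then
    if pvDigit (getElem line i h) then
      PySem.List.pyRange (i : Int) (pvScan line i : Int) 1 :: pvRuns line (pvScan line i)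
    else pvRuns line (i + 1)
  else []
termination_by line.length - i
decreasing_by
  · have h1 : i + 1 ≤ pvScan line (i + 1) := pvScan_ge line (i + 1)
    have h2 : pvScan line i = pvScan line (i + 1) := by
      conv_lhs => unfold pvScan
      simp [*]
    omega
  · omega

-- the dict comprehension of Source B: its keys 0,1,… are distinct, so the dict IS this association list
def get_part_number_indices_alt (puzzle_input : List String) : List (Int × List (List Int)) :=
  (PySem.List.enumerate puzzle_input 0).map (fun p => (p.1, pvRuns p.2.toList 0))

-- ===== PRECONDITION & SPEC =====
def Spec_get_part_number_indices (puzzle_input : List String) (out : List (Int × List (List Int))) : Prop := out = get_part_number_indices_alt puzzle_input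
instance (puzzle_input : List String) (out : List (Int × List (List Int))) : Decidable (Spec_get_part_number_indices puzzle_input out) := by unfold Spec_get_part_number_indices; infer_instance

-- ===== CLAIM (what is proved, stated in full; the proofs are below) =====
def Claim_equal_get_part_number_indices : Prop := ∀ (puzzle_input : List String), Dom_get_part_number_indices puzzle_input → Spec_get_part_number_indices puzzle_input (get_part_number_indices puzzle_input)

-- ===== LEMMAS AND PROOFS =====

-- A's digit probe `int(char)` agrees with B's `char in "0123456789"` on every domain character
theorem pvDigit_bridge_aux : ∀ k, k < 127 → (PySem.Int.ofChars? [Char.ofNat k]).isSome = pvDigit (Char.ofNat k) := by decide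

theorem pvDigit_bridge (c : Char) (h : pvDomChar c = true) :
    (PySem.Int.ofChars? [c]).isSome = pvDigit c := by
  have h127 : c.toNat < 127 := by
    simp [pvDomChar] at h; omega
  have hk := pvDigit_bridge_aux c.toNat h127
  rwa [Char.ofNat_toNat] at hk

-- A's inner step with the dict stripped out
def pvStepP (n : Int) (acc : List (List Int) × List Int) (q : Int × Char) : List (List Int) × List Int :=
  if (PySem.Int.ofChars? [q.2]).isSome then
    let stack := acc.2 ++ [q.1]
    if q.1 == n - 1 then (acc.1 ++ [stack], []) else (acc.1, stack)
  else
    if acc.2.length > 0 then (acc.1 ++ [acc.2], []) else acc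

-- A's inner step, dict-threaded (the lambda in the port, named for the proofs)
def pvStepD (n : Int) (k : Int) (acc : PySem.Dict Int (List (List Int)) × List Int) (q : Int × Char) :
    PySem.Dict Int (List (List Int)) × List Int :=
  if (PySem.Int.ofChars? [q.2]).isSome then
    let stack := acc.2 ++ [q.1]
    if q.1 == n - 1 then
      (acc.1.modify k [] (fun l => l ++ [stack]), [])
    else (acc.1, stack)
  else
    if acc.2.length > 0 then (acc.1.modify k [] (fun l => l ++ [acc.2]), [])
    else acc

-- the pure fold only appends to its first component
theorem pvStepP_shift (n : Int) (l : List (Int × Char)) :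
    ∀ res stack, l.foldl (pvStepP n) (res, stack)
      = (res ++ (l.foldl (pvStepP n) ([], stack)).1, (l.foldl (pvStepP n) ([], stack)).2) := by
  induction l with
  | nil => intro res stack; simp
  | cons q l ih =>
      intro res stack
      have key : pvStepP n (res, stack) q
          = (res ++ (pvStepP n ([], stack) q).1, (pvStepP n ([], stack) q).2) := by
        unfold pvStepP; split_ifs <;> simp
      rcases hp : pvStepP n ([], stack) q with ⟨a, b⟩
      rw [List.foldl_cons, List.foldl_cons, key, hp]
      rw [ih (res ++ a) b, ih a b]
      simp

-- A's dict-threaded inner fold is the pure fold appended at key k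
theorem pvDictSim (n : Int) (k : Int) (l : List (Int × Char)) :
    ∀ (d : PySem.Dict Int (List (List Int))) (v : List (List Int)) (stack : List Int),
      l.foldl (pvStepD n k) (d.insert k v, stack)
      = (d.insert k (v ++ (l.foldl (pvStepP n) ([], stack)).1), (l.foldl (pvStepP n) ([], stack)).2) := by
  induction l with
  | nil => intro d v stack; simp
  | cons q l ih =>
      intro d v stack
      have hmod : ∀ (w : List (List Int)) (f : List (List Int) → List (List Int)),
          (d.insert k w).modify k [] f = d.insert k (f w) := by
        intro w f
        rw [PySem.Dict.modify, PySem.Dict.getD_insert_self, PySem.Dict.insert_insert_self]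
      have key : pvStepD n k (d.insert k v, stack) q
          = (d.insert k (v ++ (pvStepP n ([], stack) q).1), (pvStepP n ([], stack) q).2) := by
        unfold pvStepD pvStepP; split_ifs <;> simp [hmod]
      rcases hp : pvStepP n ([], stack) q with ⟨a, b⟩
      rw [List.foldl_cons, List.foldl_cons, key, hp]
      rw [ih d (v ++ a) b, pvStepP_shift n l a b]
      simp

-- what A's pure fold produces from position i with run-in-progress `stack`
def pvAfter (line : List Char) (stack : List Int) (i : Nat) : List (List Int) :=
  if h : i < line.length then
    if pvDigit (getElem line i h) then
      (stack ++ PySem.List.pyRange (i : Int) (pvScan line i : Int) 1) :: pvRuns line (pvScan line i)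
    else if stack.isEmpty then pvRuns line (i + 1)
    else stack :: pvRuns line (i + 1)
  else []

theorem pvAfter_nil (line : List Char) (i : Nat) : pvAfter line [] i = pvRuns line i := by
  unfold pvAfter
  conv_rhs => unfold pvRuns
  split_ifs with h hd <;> simp_all

-- absorbing one more digit index into the run in progress
theorem pvAfter_step (line : List Char) (stack : List Int) (i : Nat)
    (h : i < line.length) (h1 : i + 1 < line.length) (hd : pvDigit (getElem line i h) = true) :
    pvAfter line (stack ++ [(i : Int)]) (i + 1) = pvAfter line stack i := by
  have hscan : pvScan line i = pvScan line (i + 1) := by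
    conv_lhs => unfold pvScan
    simp [h, hd]
  have hge : i + 1 ≤ pvScan line (i + 1) := pvScan_ge line (i + 1)
  unfold pvAfter
  rw [dif_pos h, dif_pos h1, if_pos hd]
  by_cases hd1 : pvDigit (getElem line (i + 1) h1) = true
  · rw [if_pos hd1, hscan]
    have hcons : PySem.List.pyRange (i : Int) (pvScan line (i + 1) : Int) 1
        = (i : Int) :: PySem.List.pyRange ((i : Int) + 1) (pvScan line (i + 1) : Int) 1 := by
      apply PySem.List.pyRange_one_cons
      exact_mod_cast Nat.lt_of_lt_of_le (Nat.lt_succ_self i) hge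
    rw [hcons]
    simp
  · rw [if_neg hd1]
    have hs1 : pvScan line (i + 1) = i + 1 := by
      conv_lhs => unfold pvScan
      simp [h1, hd1]
    have hpv : pvRuns line (i + 1) = pvRuns line (i + 1 + 1) := by
      conv_lhs => unfold pvRuns
      simp [h1, hd1]
    rw [hscan, hs1, hpv]
    have hsingle : PySem.List.pyRange (i : Int) ((i + 1 : Nat) : Int) 1 = [(i : Int)] := by
      push_cast
      exact PySem.List.pyRange_one_singleton (i : Int)
    rw [hsingle]
    simp

-- the main invariant: A's pure fold over the tail of the line equals pvAfter
theorem pvCore (line : List Char) (hdom : ∀ c ∈ line, pvDomChar c = true) :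
    ∀ m i stack, line.length - i ≤ m → i ≤ line.length →
      (((PySem.List.enumerate (line.drop i) (i : Int)).foldl (pvStepP (line.length : Int)) ([], stack)).1
        = pvAfter line stack i) := by
  intro m
  induction m with
  | zero =>
      intro i stack hm hi
      have hlen : i = line.length := by omega
      rw [hlen, List.drop_length]
      unfold pvAfter
      simp
  | succ m ih =>
      intro i stack hm hi
      by_cases h : i < line.length
      · have hdrop : line.drop i = getElem line i h :: line.drop (i + 1) :=
          (List.getElem_cons_drop h).symm
        rw [hdrop, PySem.List.enumerate_cons, List.foldl_cons]
        have hc : (PySem.Int.ofChars? [getElem line i h]).isSome = pvDigit (getElem line i h) :=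
          pvDigit_bridge _ (hdom _ (List.getElem_mem h))
        by_cases hd : pvDigit (getElem line i h) = true
        · by_cases hlast : i + 1 = line.length
          · have hhead : pvStepP (line.length : Int) ([], stack) ((i : Int), getElem line i h)
                = ([stack ++ [(i : Int)]], []) := by
              unfold pvStepP
              rw [hc]
              have : (((i : Int) == (line.length : Int) - 1)) = true := by
                simp only [beq_iff_eq]; omega
              simp [hd, this]
            rw [hhead]
            have hrest : line.drop (i + 1) = [] := by
              rw [hlast, List.drop_length]
            rw [hrest]
            simp only [PySem.List.enumerate_nil, List.foldl_nil]
            unfold pvAfter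
            rw [dif_pos h, if_pos hd]
            have hs1 : pvScan line (i + 1) = i + 1 := by
              unfold pvScan; simp [hlast]
            have hscan : pvScan line i = i + 1 := by
              conv_lhs => unfold pvScan
              simp [h, hd, hs1]
            have hruns : pvRuns line (i + 1) = [] := by
              unfold pvRuns; simp [hlast]
            rw [hscan, hruns]
            have hsingle : PySem.List.pyRange (i : Int) ((i + 1 : Nat) : Int) 1 = [(i : Int)] := by
              push_cast
              exact PySem.List.pyRange_one_singleton (i : Int)
            rw [hsingle]
          · have hhead : pvStepP (line.length : Int) ([], stack) ((i : Int), getElem line i h)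
                = ([], stack ++ [(i : Int)]) := by
              unfold pvStepP
              rw [hc]
              have : (((i : Int) == (line.length : Int) - 1)) = false := by
                simp only [beq_eq_false_iff_ne, ne_eq]
                intro hcontra; omega
              simp [hd, this]
            rw [hhead]
            have h1 : i + 1 < line.length := by omega
            have := ih (i + 1) (stack ++ [(i : Int)]) (by omega) (by omega)
            rw [show ((i : Int) + 1) = ((i + 1 : Nat) : Int) by push_cast; ring, this]
            exact pvAfter_step line stack i h h1 hd
        · by_cases hs : stack = []
          · have hhead : pvStepP (line.length : Int) ([], stack) ((i : Int), getElem line i h)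
                = ([], stack) := by
              unfold pvStepP
              rw [hc]
              simp [hd, hs]
            rw [hhead]
            have := ih (i + 1) stack (by omega) (by omega)
            rw [show ((i : Int) + 1) = ((i + 1 : Nat) : Int) by push_cast; ring, this]
            subst hs
            rw [pvAfter_nil]
            unfold pvAfter
            rw [dif_pos h, if_neg hd]
            simp
          · have hhead : pvStepP (line.length : Int) ([], stack) ((i : Int), getElem line i h)
                = ([stack], []) := by
              unfold pvStepP
              rw [hc]
              have : stack.length > 0 := by
                cases stack with
                | nil => exact absurd rfl hs
                | cons a t => simp
              simp [hd, this]
            rw [hhead]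
            rw [show ((i : Int) + 1) = ((i + 1 : Nat) : Int) by push_cast; ring]
            rw [pvStepP_shift, ih (i + 1) [] (by omega) (by omega), pvAfter_nil]
            unfold pvAfter
            rw [dif_pos h, if_neg hd]
            simp [hs]
      · have hlen : i = line.length := by omega
        rw [hlen, List.drop_length]
        unfold pvAfter
        simp

-- per line: A's pure fold from the start is B's scanner
theorem pvLine (line : List Char) (hdom : ∀ c ∈ line, pvDomChar c = true) :
    ((PySem.List.enumerate line 0).foldl (pvStepP (line.length : Int)) ([], [])).1 = pvRuns line 0 := by
  have h := pvCore line hdom line.length 0 [] (by omega) (Nat.zero_le _)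
  rw [pvAfter_nil] at h
  simpa using h

-- ===== VERDICT (by name: the statement is the Claim_ definition above) =====
theorem get_part_number_indices_spec : Claim_equal_get_part_number_indices := by
  intro puzzle_input hdom
  unfold Spec_get_part_number_indices get_part_number_indices get_part_number_indices_alt
  have hfun : (fun (d : PySem.Dict Int (List (List Int))) (p : Int × String) =>
      let line := p.2.toList
      let d := d.insert p.1 ([] : List (List Int))
      let st := (PySem.List.enumerate line 0).foldl
        (fun (acc : PySem.Dict Int (List (List Int)) × List Int) q =>
          if (PySem.Int.ofChars? [q.2]).isSome then
            let stack := acc.2 ++ [q.1]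
            if q.1 == (line.length : Int) - 1 then
              (acc.1.modify p.1 [] (fun l => l ++ [stack]), [])
            else (acc.1, stack)
          else
            if acc.2.length > 0 then (acc.1.modify p.1 [] (fun l => l ++ [acc.2]), [])
            else acc) (d, [])
      st.1)
      = fun d p => d.insert p.1
          (((PySem.List.enumerate p.2.toList 0).foldl (pvStepP (p.2.toList.length : Int)) ([], [])).1) := by
    funext d p
    show ((PySem.List.enumerate p.2.toList 0).foldl
        (pvStepD (p.2.toList.length : Int) p.1) (d.insert p.1 [], [])).1 = _
    rw [pvDictSim]
    rfl
  rw [hfun]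
  rw [PySem.Dict.items_foldl_insert_fresh (PySem.List.enumerate puzzle_input 0)
      (fun p => p.1)
      (fun p => ((PySem.List.enumerate p.2.toList 0).foldl (pvStepP (p.2.toList.length : Int)) ([], [])).1)
      PySem.Dict.empty
      (by intro a _; rfl)
      (by rw [PySem.List.map_fst_enumerate]; exact PySem.List.nodup_pyRange_one 0 _)]
  rw [show (PySem.Dict.empty : PySem.Dict Int (List (List Int))).items = [] from rfl,
     List.nil_append]
  apply List.map_congr_left
  intro p hp
  have hmem : p.2 ∈ puzzle_input := by
    have := PySem.List.map_snd_enumerate puzzle_input (0 : Int)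
    rw [← this]
    exact List.mem_map_of_mem hp
  have hdomline : ∀ c ∈ p.2.toList, pvDomChar c = true := by
    intro c hc
    unfold Dom_get_part_number_indices at hdom
    rw [List.all_eq_true] at hdom
    have := hdom _ hmem
    unfold pvDomStr at this
    rw [List.all_eq_true] at this
    exact this c hc
  rw [pvLine p.2.toList hdomline]
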